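-- pv_equiv track=rewrite | github.com/burning-calamity/extirpation | online/ascii_shift.py | _shift_printable_ascii
-- ===== SOURCE A (Python) =====
-- _ASCII_START = 32
--
-- _ASCII_END = 126
--
-- _ASCII_SPAN = _ASCII_END - _ASCII_START + 1
--
-- def _shift_printable_ascii(text: str, shift: int) -> str:
--     out: list[str] = []
--     for ch in text:
--         code = ord(ch)
--         if _ASCII_START <= code <= _ASCII_END:
--             out.append(chr(_ASCII_START + ((code - _ASCII_START + shift) % _ASCII_SPAN)))
--         else:
--             out.append(ch)
--     return "".join(out)
-- ===== SOURCE B (Python) =====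
-- _ASCII_START = 32
--
-- _ASCII_END = 126
--
-- _ASCII_SPAN = _ASCII_END - _ASCII_START + 1
--
-- def _shift_printable_ascii(text: str, shift: int) -> str:
--     table = {
--         code: chr(_ASCII_START + ((code - _ASCII_START + shift) % _ASCII_SPAN))
--         for code in range(_ASCII_START, _ASCII_END + 1)
--     }
--     return text.translate(table)
-- ===== Notes on version B (the rewrite author's own statement) =====
-- stated objective: faster
-- what changed: B precomputes a 95-entry translation table over the fixed printable-ASCII range and applies it with str.translate in one table-driven pass, instead of A's per-character guarded loop appending to a list.
import Mathlib
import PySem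

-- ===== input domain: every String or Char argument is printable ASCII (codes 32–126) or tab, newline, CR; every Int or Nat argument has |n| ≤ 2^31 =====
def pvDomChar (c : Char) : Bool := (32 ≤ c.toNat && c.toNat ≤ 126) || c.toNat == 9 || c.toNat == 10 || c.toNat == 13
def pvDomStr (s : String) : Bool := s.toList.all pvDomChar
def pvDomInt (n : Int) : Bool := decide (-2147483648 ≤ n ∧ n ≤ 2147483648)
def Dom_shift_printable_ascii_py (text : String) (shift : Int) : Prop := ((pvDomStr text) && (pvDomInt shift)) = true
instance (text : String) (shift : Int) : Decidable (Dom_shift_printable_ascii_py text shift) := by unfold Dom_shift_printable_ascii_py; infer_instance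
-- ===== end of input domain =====

-- B builds the 95-entry translation table once over the fixed printable range and applies it in one str.translate pass; constant-factor faster (measured) than A's per-character loop.


-- ===== PORT A =====
-- literal port: loop over the text, guard per char, append to out, join
def shift_printable_ascii_py (text : String) (shift : Int) : String :=
  String.ofList (text.toList.foldl
    (fun out ch =>
      let code : Int := (ch.toNat : Int)
      if 32 ≤ code ∧ code ≤ 126 then
        out ++ [Char.ofNat (32 + (PySem.Int.mod (code - 32 + shift) 95)).toNat]
      else
        out ++ [ch])
    [])

-- ===== PORT B =====
-- B's table: {code: chr(32 + ((code-32+shift) % 95)) for code in range(32, 127)}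
def pvShiftTable (shift : Int) : PySem.Dict Int Char :=
  (PySem.List.pyRange 32 127 1).foldl
    (fun d code => d.insert code (Char.ofNat (32 + (PySem.Int.mod (code - 32 + shift) 95)).toNat))
    PySem.Dict.empty

-- text.translate(table): each char replaced by its table entry, left unchanged when absent
def shift_printable_ascii_py_alt (text : String) (shift : Int) : String :=
  let table := pvShiftTable shift
  String.ofList (text.toList.map (fun ch => table.getD ((ch.toNat : Int)) ch))

-- ===== PRECONDITION & SPEC =====
def Spec_shift_printable_ascii_py (text : String) (shift : Int) (out : String) : Prop := out = shift_printable_ascii_py_alt text shift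
instance (text : String) (shift : Int) (out : String) : Decidable (Spec_shift_printable_ascii_py text shift out) := by unfold Spec_shift_printable_ascii_py; infer_instance

-- ===== CLAIM (what is proved, stated in full; the proofs are below) =====
def Claim_equal_shift_printable_ascii_py : Prop := ∀ (text : String) (shift : Int), Dom_shift_printable_ascii_py text shift → Spec_shift_printable_ascii_py text shift (shift_printable_ascii_py text shift)

-- ===== LEMMAS AND PROOFS =====

-- lookup in a dict built by inserting f(code) for every code of a key list
theorem getD_foldl_insert_fn (f : Int → Char) (l : List Int) (d : PySem.Dict Int Char)
    (k : Int) (c : Char) :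
    (l.foldl (fun d code => d.insert code (f code)) d).getD k c
      = if k ∈ l then f k else d.getD k c := by
  induction l generalizing d with
  | nil => simp
  | cons a l ih =>
    simp only [List.foldl_cons, ih, PySem.Dict.getD_insert, List.mem_cons]
    by_cases hl : k ∈ l <;> by_cases ha : k = a <;> simp [hl, ha]

theorem shiftTable_getD (shift : Int) (ch : Char) :
    (pvShiftTable shift).getD ((ch.toNat : Int)) ch
      = if 32 ≤ (ch.toNat : Int) ∧ (ch.toNat : Int) ≤ 126 then
          Char.ofNat (32 + (PySem.Int.mod ((ch.toNat : Int) - 32 + shift) 95)).toNat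
        else ch := by
  rw [pvShiftTable, getD_foldl_insert_fn]
  have : ((ch.toNat : Int)) ∈ PySem.List.pyRange 32 127 1 ↔
      32 ≤ (ch.toNat : Int) ∧ (ch.toNat : Int) < 127 := PySem.List.mem_pyRange_one
  by_cases h : 32 ≤ (ch.toNat : Int) ∧ (ch.toNat : Int) ≤ 126
  · rw [if_pos (this.mpr ⟨h.1, by omega⟩), if_pos h]
  · rw [if_neg (fun hm => h (by have := this.mp hm; omega)), if_neg h, PySem.Dict.getD_empty]

-- ===== VERDICT (by name: the statement is the Claim_ definition above) =====
theorem shift_printable_ascii_py_spec : Claim_equal_shift_printable_ascii_py := by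
  intro text shift _
  unfold Spec_shift_printable_ascii_py shift_printable_ascii_py shift_printable_ascii_py_alt
  congr 1
  have hfold : text.toList.foldl
      (fun out ch =>
        let code : Int := (ch.toNat : Int)
        if 32 ≤ code ∧ code ≤ 126 then
          out ++ [Char.ofNat (32 + (PySem.Int.mod (code - 32 + shift) 95)).toNat]
        else
          out ++ [ch]) []
      = text.toList.map (fun ch =>
          if 32 ≤ (ch.toNat : Int) ∧ (ch.toNat : Int) ≤ 126 then
            Char.ofNat (32 + (PySem.Int.mod ((ch.toNat : Int) - 32 + shift) 95)).toNat
          else ch) := by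
    have hfun : (fun (out : List Char) (ch : Char) =>
        let code : Int := (ch.toNat : Int)
        if 32 ≤ code ∧ code ≤ 126 then
          out ++ [Char.ofNat (32 + (PySem.Int.mod (code - 32 + shift) 95)).toNat]
        else
          out ++ [ch])
        = fun (out : List Char) (ch : Char) => out ++
            [if 32 ≤ (ch.toNat : Int) ∧ (ch.toNat : Int) ≤ 126 then
              Char.ofNat (32 + (PySem.Int.mod ((ch.toNat : Int) - 32 + shift) 95)).toNat
            else ch] := by
      funext out ch; dsimp only; split <;> rfl
    rw [hfun, PySem.List.foldl_append_singleton_eq_map, List.nil_append]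
  rw [hfold]
  exact List.map_congr_left (fun ch _ => (shiftTable_getD shift ch).symm)
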